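-- pv_equiv track=rewrite | github.com/carpaca/MonitoringBusCapacityRU | get_info.py | contact_rec
-- ===== SOURCE A (Python) =====
-- def contact_rec(contact_dict, student_list):
--     key_list = ["student", "vehicle_num", "date"]
--     contact_data = []
--     for i in range(len(contact_dict)):
--         current_student = (student_list[i],)
--         ride_list = contact_dict.get(current_student)
--         contact_data.append(student_list[i])
--         contact_data.append(ride_list[0])
--         contact_data.append(ride_list[1])
--
--     n = len(contact_data)
--     contact_info = []
--
--     for l in range(0, n, 3):
--         contact_info.append({key_list[0]: contact_data[l], key_list[1]: contact_data[l + 1], key_list[2]: contact_data[l + 2]})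
--
--     return contact_info
-- ===== SOURCE B (Python) =====
-- def contact_rec(contact_dict, student_list):
--     contact_info = []
--     for i in range(len(contact_dict)):
--         student = student_list[i]
--         ride_list = contact_dict.get((student,))
--         contact_info.append({"student": student, "vehicle_num": ride_list[0], "date": ride_list[1]})
--     return contact_info
-- ===== Notes on version B (the rewrite author's own statement) =====
-- stated objective: simpler
-- what changed: Single loop that builds each record dict directly, dropping A's intermediate flat contact_data list and its second modular-index grouping pass.
import Mathlib
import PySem

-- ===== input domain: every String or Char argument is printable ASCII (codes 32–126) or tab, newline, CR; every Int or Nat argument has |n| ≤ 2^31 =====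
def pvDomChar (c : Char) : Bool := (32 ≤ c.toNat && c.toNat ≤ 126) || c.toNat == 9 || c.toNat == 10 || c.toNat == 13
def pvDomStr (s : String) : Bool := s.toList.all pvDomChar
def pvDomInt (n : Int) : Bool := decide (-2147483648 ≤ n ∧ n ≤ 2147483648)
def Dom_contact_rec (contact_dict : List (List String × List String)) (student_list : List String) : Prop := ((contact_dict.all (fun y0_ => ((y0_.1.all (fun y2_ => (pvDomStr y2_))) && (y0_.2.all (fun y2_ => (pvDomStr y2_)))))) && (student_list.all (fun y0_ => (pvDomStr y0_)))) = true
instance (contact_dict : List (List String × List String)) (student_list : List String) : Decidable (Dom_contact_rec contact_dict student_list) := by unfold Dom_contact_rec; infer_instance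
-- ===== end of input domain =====

-- B replaces A's two passes (flat contact_data list, then modular grouping) by one loop building each record directly: simpler decomposition, same values.


-- ===== PORT A =====
def contact_rec (contact_dict : List (List String × List String)) (student_list : List String) : List (List (String × String)) :=
  let key_list : List String := ["student", "vehicle_num", "date"]
  let contact_data : List String :=
    (List.range contact_dict.length).foldl (fun acc (i : Nat) =>
      let current_student : List String := [PySem.List.pyGetD student_list (i : Int) ""]
      let ride_list : List String := (PySem.Dict.get? (PySem.Dict.mk contact_dict) current_student).getD []
      acc ++ [PySem.List.pyGetD student_list (i : Int) "",
              PySem.List.pyGetD ride_list 0 "",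
              PySem.List.pyGetD ride_list 1 ""]) []
  let n : Int := contact_data.length
  (PySem.List.pyRange 0 n 3).foldl (fun acc l =>
    acc ++ [[(PySem.List.pyGetD key_list 0 "", PySem.List.pyGetD contact_data l ""),
             (PySem.List.pyGetD key_list 1 "", PySem.List.pyGetD contact_data (l + 1) ""),
             (PySem.List.pyGetD key_list 2 "", PySem.List.pyGetD contact_data (l + 2) "")]]) []

-- ===== PORT B =====
def contact_rec_alt (contact_dict : List (List String × List String)) (student_list : List String) : List (List (String × String)) :=
  (List.range contact_dict.length).foldl (fun acc (i : Nat) =>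
    let student : String := PySem.List.pyGetD student_list (i : Int) ""
    let ride_list : List String := (PySem.Dict.get? (PySem.Dict.mk contact_dict) [student]).getD []
    acc ++ [[("student", student),
             ("vehicle_num", PySem.List.pyGetD ride_list 0 ""),
             ("date", PySem.List.pyGetD ride_list 1 "")]]) []

-- ===== PRECONDITION & SPEC =====
-- Pre_ excludes exactly the inputs where the Python A raises: student_list shorter than contact_dict
-- (IndexError), a looked-up student missing from the dict (TypeError on None[0]), or a ride list with
-- fewer than two entries (IndexError).
def Pre_contact_rec (contact_dict : List (List String × List String)) (student_list : List String) : Prop :=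
  contact_dict.length ≤ student_list.length ∧
  ∀ s ∈ student_list.take contact_dict.length,
    2 ≤ ((PySem.Dict.get? (PySem.Dict.mk contact_dict) [s]).getD []).length
instance (contact_dict : List (List String × List String)) (student_list : List String) : Decidable (Pre_contact_rec contact_dict student_list) := by unfold Pre_contact_rec; infer_instance

def pvWitness_contact_rec : (List (List String × List String)) × List String :=
  ([(["a"], ["v1", "d1"]), (["b"], ["v2", "d2"])], ["a", "b"])

def Spec_contact_rec (contact_dict : List (List String × List String)) (student_list : List String) (out : List (List (String × String))) : Prop := out = contact_rec_alt contact_dict student_list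
instance (contact_dict : List (List String × List String)) (student_list : List String) (out : List (List (String × String))) : Decidable (Spec_contact_rec contact_dict student_list out) := by unfold Spec_contact_rec; infer_instance

-- ===== CLAIM (what is proved, stated in full; the proofs are below) =====
def Claim_equal_contact_rec : Prop := ∀ (contact_dict : List (List String × List String)) (student_list : List String), Dom_contact_rec contact_dict student_list → Pre_contact_rec contact_dict student_list → Spec_contact_rec contact_dict student_list (contact_rec contact_dict student_list)

-- ===== LEMMAS AND PROOFS =====

-- the value student_list[i] and ride list looked up at step i (shared by both ports)
def pvSt (student_list : List String) (i : Nat) : String := PySem.List.pyGetD student_list (i : Int) ""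
def pvRl (contact_dict : List (List String × List String)) (student_list : List String) (i : Nat) : List String :=
  (PySem.Dict.get? (PySem.Dict.mk contact_dict) [pvSt student_list i]).getD []
-- the record B builds at step i
def pvRow (cd : List (List String × List String)) (sl : List String) (i : Nat) : List (String × String) :=
  [("student", pvSt sl i),
   ("vehicle_num", PySem.List.pyGetD (pvRl cd sl i) 0 ""),
   ("date", PySem.List.pyGetD (pvRl cd sl i) 1 "")]
-- A's flat contact_data list after n loop steps
def pvData (cd : List (List String × List String)) (sl : List String) (n : Nat) : List String :=
  (List.range n).foldl (fun acc i =>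
    acc ++ [pvSt sl i, PySem.List.pyGetD (pvRl cd sl i) 0 "", PySem.List.pyGetD (pvRl cd sl i) 1 ""]) []

theorem pvData_succ (cd : List (List String × List String)) (sl : List String) (n : Nat) :
    pvData cd sl (n + 1) = pvData cd sl n ++ [pvSt sl n, PySem.List.pyGetD (pvRl cd sl n) 0 "", PySem.List.pyGetD (pvRl cd sl n) 1 ""] := by
  simp [pvData, List.range_succ]

theorem pvData_length (cd : List (List String × List String)) (sl : List String) (n : Nat) :
    (pvData cd sl n).length = 3 * n := by
  induction n with
  | zero => simp [pvData]
  | succ n ih => rw [pvData_succ]; simp [ih]; omega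

theorem pyGetD_append_left {α : Type} (xs ys : List α) (i : Int) (d : α) (h0 : 0 ≤ i) (h1 : i < (xs.length : Int)) :
    PySem.List.pyGetD (xs ++ ys) i d = PySem.List.pyGetD xs i d := by
  rw [PySem.List.pyGetD_eq_getElem _ d h0 (by simp; omega),
      PySem.List.pyGetD_eq_getElem xs d h0 h1]
  exact List.getElem_append_left (by omega)

theorem pyGetD_append_right {α : Type} (xs ys : List α) (i : Int) (j : Nat) (d : α)
    (hj : j < ys.length) (hi : i = (xs.length : Int) + j) :
    PySem.List.pyGetD (xs ++ ys) i d = ys.getD j d := by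
  rw [PySem.List.pyGetD_eq_getElem _ d (by omega) (by simp; omega)]
  have ht : i.toNat = xs.length + j := by omega
  simp only [ht]
  rw [List.getElem_append_right (by omega)]
  have hidx : xs.length + j - xs.length = j := by omega
  simp only [hidx]
  simp [List.getD_eq_getElem?_getD, List.getElem?_eq_getElem hj]

theorem pvData_idx (cd : List (List String × List String)) (sl : List String) (n k j : Nat) (i : Int)
    (hk : k < n) (hj : j < 3) (hi : i = 3 * (k : Int) + j) :
    PySem.List.pyGetD (pvData cd sl n) i "" =
      List.getD [pvSt sl k, PySem.List.pyGetD (pvRl cd sl k) 0 "", PySem.List.pyGetD (pvRl cd sl k) 1 ""] j "" := by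
  induction n with
  | zero => omega
  | succ n ih =>
    rw [pvData_succ]
    rcases Nat.lt_or_ge k n with hlt | hge
    · rw [pyGetD_append_left _ _ _ _ (by omega) (by rw [pvData_length]; omega)]
      exact ih hlt
    · have hk' : k = n := by omega
      subst hk'
      exact pyGetD_append_right _ _ _ j _ (by simp; omega) (by rw [pvData_length]; omega)

theorem pvRange3 (n : Nat) :
    PySem.List.pyRange 0 ((3 * n : Nat) : Int) 3 = (List.range n).map (fun k => ((3 * k : Nat) : Int)) := by
  rw [PySem.List.pyRange_of_pos _ _ (by norm_num)]
  have h : (if (0 : Int) < ((3 * n : Nat) : Int) then ((((3 * n : Nat) : Int) - 0 + 3 - 1) / 3).toNat else 0) = n := by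
    split_ifs with h <;> omega
  rw [h]
  apply List.map_congr_left
  intro k _
  push_cast
  ring

theorem ports_agree (cd : List (List String × List String)) (sl : List String) :
    contact_rec cd sl = contact_rec_alt cd sl := by
  have hA : contact_rec cd sl =
      (PySem.List.pyRange 0 ((pvData cd sl cd.length).length : Int) 3).foldl (fun acc l =>
        acc ++ [[("student", PySem.List.pyGetD (pvData cd sl cd.length) l ""),
                 ("vehicle_num", PySem.List.pyGetD (pvData cd sl cd.length) (l + 1) ""),
                 ("date", PySem.List.pyGetD (pvData cd sl cd.length) (l + 2) "")]]) [] := rfl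
  have hB : contact_rec_alt cd sl = (List.range cd.length).map (pvRow cd sl) := by
    show (List.range cd.length).foldl (fun acc i => acc ++ [pvRow cd sl i]) [] = _
    rw [PySem.List.foldl_append_singleton_eq_map (pvRow cd sl) (List.range cd.length) []]
    simp
  rw [hA, hB, pvData_length, pvRange3, List.foldl_map,
      PySem.List.foldl_append_singleton_eq_map
        (fun k => [("student", PySem.List.pyGetD (pvData cd sl cd.length) ((3 * k : Nat) : Int) ""),
                   ("vehicle_num", PySem.List.pyGetD (pvData cd sl cd.length) (((3 * k : Nat) : Int) + 1) ""),
                   ("date", PySem.List.pyGetD (pvData cd sl cd.length) (((3 * k : Nat) : Int) + 2) "")])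
        (List.range cd.length) []]
  simp only [List.nil_append]
  apply List.map_congr_left
  intro k hk
  have hkn : k < cd.length := List.mem_range.mp hk
  rw [pvData_idx cd sl cd.length k 0 _ hkn (by omega) (by push_cast; ring),
      pvData_idx cd sl cd.length k 1 _ hkn (by omega) (by push_cast; ring),
      pvData_idx cd sl cd.length k 2 _ hkn (by omega) (by push_cast; ring)]
  simp [pvRow]

-- ===== VERDICT (by name: the statement is the Claim_ definition above) =====
theorem contact_rec_spec : Claim_equal_contact_rec := by
  intro cd sl _hdom _hpre
  exact ports_agree cd sl
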